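-- pv_equiv track=rewrite | github.com/Cosmo-Tech/CosmoTech-Acceleration-Library | CosmoTech_Acceleration_Library/Accelerators/scenario_download/scenario_downloader.py | sheet_to_header
-- ===== SOURCE A (Python) =====
-- def sheet_to_header(sheet_content):
--     fieldnames = []
--     has_src = False
--     has_id = False
--     for r in sheet_content:
--         for k in r.keys():
--             if k not in fieldnames:
--                 if k in ['source', 'target']:
--                     has_src = True
--                 elif k == "id":
--                     has_id = True
--                 else:
--                     fieldnames.append(k)
--     if has_src:
--         fieldnames = ['source', 'target'] + fieldnames
--     if has_id:
--         fieldnames = ['id', ] + fieldnames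
--     return fieldnames
-- ===== SOURCE B (Python) =====
-- def sheet_to_header(sheet_content):
--     # Selection-by-filtering: repeatedly take the first remaining key and
--     # purge ALL its occurrences from the remainder; no membership test
--     # against an accumulator is ever made.
--     rest = [k for r in sheet_content for k in r.keys()]
--     uniq = []
--     while rest:
--         head = rest[0]
--         uniq.append(head)
--         rest = [k for k in rest if k != head]
--     fieldnames = [k for k in uniq if k not in ('source', 'target', 'id')]
--     if 'source' in uniq or 'target' in uniq:
--         fieldnames = ['source', 'target'] + fieldnames
--     if 'id' in uniq:
--         fieldnames = ['id'] + fieldnames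
--     return fieldnames
-- ===== Notes on version B (the rewrite author's own statement) =====
-- stated objective: alternative
-- what changed: A's single classify-and-dedup loop (membership scan against a growing accumulator plus inline flag setting) is replaced by selection-by-filtering: repeatedly take the first remaining key and purge all its occurrences from the remainder, then classify the unique-key table in separate filtering/membership passes.
import Mathlib
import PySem

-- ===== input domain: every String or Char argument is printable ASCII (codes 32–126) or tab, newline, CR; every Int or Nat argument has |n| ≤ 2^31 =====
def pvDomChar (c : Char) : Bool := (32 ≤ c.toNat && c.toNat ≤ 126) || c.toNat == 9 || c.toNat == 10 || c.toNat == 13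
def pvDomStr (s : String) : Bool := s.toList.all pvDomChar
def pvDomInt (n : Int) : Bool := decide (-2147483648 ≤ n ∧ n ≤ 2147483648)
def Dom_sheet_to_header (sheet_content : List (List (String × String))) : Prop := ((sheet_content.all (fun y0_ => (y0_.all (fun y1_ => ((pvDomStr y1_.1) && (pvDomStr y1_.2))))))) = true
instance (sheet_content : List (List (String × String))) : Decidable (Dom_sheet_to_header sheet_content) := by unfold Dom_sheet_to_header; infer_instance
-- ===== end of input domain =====

-- B replaces A's classify-and-dedup loop (membership scan per key) by selection-by-filtering (take first remaining key, purge its occurrences) followed by separate classify passes; objective: alternative decomposition.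


-- ===== PORT A =====
-- one step of A's inner loop body, on the state (fieldnames, has_src, has_id)
def stepA (st : List String × Bool × Bool) (k : String) : List String × Bool × Bool :=
  if k ∉ st.1 then
    if k = "source" ∨ k = "target" then (st.1, true, st.2.2)
    else if k = "id" then (st.1, st.2.1, true)
    else (st.1 ++ [k], st.2.1, st.2.2)
  else st

def sheet_to_header (sheet_content : List (List (String × String))) : List String :=
  let st := sheet_content.foldl (fun st r => (r.map Prod.fst).foldl stepA st) ([], false, false)
  let fieldnames := if st.2.1 then ["source", "target"] ++ st.1 else st.1
  if st.2.2 then ["id"] ++ fieldnames else fieldnames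

-- ===== PORT B =====
-- B's while loop: take the first remaining key, purge all its occurrences, repeat
def uniqLoop (uniq : List String) (rest : List String) : List String :=
  match rest with
  | [] => uniq
  | head :: tail =>
      uniqLoop (uniq ++ [head]) ((head :: tail).filter (fun k => k ≠ head))
termination_by rest.length
decreasing_by
  simp only [List.filter_cons, decide_not]
  simp
  exact List.length_filter_le _ _

def sheet_to_header_alt (sheet_content : List (List (String × String))) : List String :=
  let uniq := uniqLoop [] (sheet_content.flatMap (fun r => r.map Prod.fst))
  let fieldnames := uniq.filter (fun k => k ∉ ["source", "target", "id"])
  let fieldnames := if "source" ∈ uniq ∨ "target" ∈ uniq then ["source", "target"] ++ fieldnames else fieldnames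
  if "id" ∈ uniq then ["id"] ++ fieldnames else fieldnames

-- ===== PRECONDITION & SPEC =====
def Spec_sheet_to_header (sheet_content : List (List (String × String))) (out : List String) : Prop := out = sheet_to_header_alt sheet_content
instance (sheet_content : List (List (String × String))) (out : List String) : Decidable (Spec_sheet_to_header sheet_content out) := by unfold Spec_sheet_to_header; infer_instance

-- ===== CLAIM (what is proved, stated in full; the proofs are below) =====
def Claim_equal_sheet_to_header : Prop := ∀ (sheet_content : List (List (String × String))), Dom_sheet_to_header sheet_content → Spec_sheet_to_header sheet_content (sheet_to_header sheet_content)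

-- ===== LEMMAS AND PROOFS =====

-- accumulator-free version of B's while loop, for the proofs
def firstOcc (rest : List String) : List String :=
  match rest with
  | [] => []
  | head :: tail => head :: firstOcc (tail.filter (fun k => k ≠ head))
termination_by rest.length
decreasing_by
  calc ((tail.attach.filter _).unattach).length
      ≤ tail.attach.length := by
        rw [List.length_unattach]; exact List.length_filter_le _ _
    _ < (head :: tail).length := by simp

theorem uniqLoop_eq_firstOcc_aux (n : Nat) (rest uniq : List String) (h : rest.length ≤ n) :
    uniqLoop uniq rest = uniq ++ firstOcc rest := by
  induction n generalizing rest uniq with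
  | zero =>
      have : rest = [] := by cases rest <;> simp_all
      subst this; rw [uniqLoop, firstOcc]; simp
  | succ n ih =>
      cases rest with
      | nil => rw [uniqLoop, firstOcc]; simp
      | cons head tail =>
          rw [uniqLoop, firstOcc]
          simp only [List.filter_cons, decide_not]
          simp only [decide_true, Bool.not_true, Bool.false_eq_true, if_false]
          rw [ih _ _ (le_trans (List.length_filter_le _ _) (Nat.le_of_succ_le_succ h))]
          simp

theorem uniqLoop_eq_firstOcc (uniq rest : List String) :
    uniqLoop uniq rest = uniq ++ firstOcc rest :=
  uniqLoop_eq_firstOcc_aux rest.length rest uniq le_rfl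

-- A's dedup accumulator, characterised by firstOcc on the yet-unseen keys
theorem foldl_setAdd_eq_firstOcc (ks : List String) (acc : List String) :
    ks.foldl PySem.Set.add acc = acc ++ firstOcc (ks.filter (fun x => x ∉ acc)) := by
  induction ks generalizing acc with
  | nil => simp [firstOcc]
  | cons k t ih =>
      by_cases hk : k ∈ acc
      · simp [PySem.Set.add, PySem.Set.contains, hk, ih]
      · rw [List.foldl_cons]
        have hadd : PySem.Set.add acc k = acc ++ [k] := by
          simp [PySem.Set.add, PySem.Set.contains, hk]
        have hfilters : List.filter (fun x => decide (x ∉ acc ++ [k])) t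
            = List.filter (fun x => decide (x ≠ k)) (List.filter (fun x => decide (x ∉ acc)) t) := by
          rw [List.filter_filter]
          apply List.filter_congr
          intro x _
          by_cases h1 : x ∈ acc <;> by_cases h2 : x = k <;> simp [h1, h2]
        rw [hadd, ih, hfilters, List.filter_cons]
        simp [hk, firstOcc]

-- the abstraction function: A's loop state, read off from the unique-key table
def stFromUniq (acc : List String) : List String × Bool × Bool :=
  (acc.filter (fun k => k ∉ ["source", "target", "id"]),
   decide ("source" ∈ acc) || decide ("target" ∈ acc),
   decide ("id" ∈ acc))

theorem stepA_stFromUniq (acc : List String) (k : String) :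
    stepA (stFromUniq acc) k = stFromUniq (PySem.Set.add acc k) := by
  by_cases hmem : k ∈ acc <;> by_cases h1 : k = "source" <;> by_cases h2 : k = "target" <;>
    by_cases h3 : k = "id" <;>
    simp_all [stepA, stFromUniq, PySem.Set.add, List.filter_append, @eq_comm String]

theorem foldl_stepA_stFromUniq (L : List String) (acc : List String) :
    L.foldl stepA (stFromUniq acc) = stFromUniq (L.foldl PySem.Set.add acc) := by
  induction L generalizing acc with
  | nil => rfl
  | cons k L ih => simp only [List.foldl_cons, stepA_stFromUniq, ih]

-- ===== VERDICT (by name: the statement is the Claim_ definition above) =====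
theorem sheet_to_header_spec : Claim_equal_sheet_to_header := by
  intro sc _
  show sheet_to_header sc = sheet_to_header_alt sc
  unfold sheet_to_header sheet_to_header_alt
  rw [← List.foldl_flatMap]
  have h0 : (([], false, false) : List String × Bool × Bool) = stFromUniq [] := by rfl
  rw [h0, foldl_stepA_stFromUniq]
  set ks := sc.flatMap (fun r => r.map Prod.fst) with hks
  have hu : uniqLoop [] ks = ks.foldl PySem.Set.add [] := by
    rw [uniqLoop_eq_firstOcc, foldl_setAdd_eq_firstOcc]
    simp
  rw [hu]
  set u := ks.foldl PySem.Set.add [] with hu2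
  simp only [stFromUniq]
  by_cases hs : "source" ∈ u ∨ "target" ∈ u
  · have : (decide ("source" ∈ u) || decide ("target" ∈ u)) = true := by
      rcases hs with h | h <;> simp [h]
    by_cases hi : "id" ∈ u <;> simp [this, hs, hi]
  · have hs1 : "source" ∉ u := fun h => hs (Or.inl h)
    have hs2 : "target" ∉ u := fun h => hs (Or.inr h)
    have : (decide ("source" ∈ u) || decide ("target" ∈ u)) = false := by
      simp [hs1, hs2]
    by_cases hi : "id" ∈ u <;> simp [this, hi, hs]
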